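-- pv_equiv track=rewrite | github.com/Josetoanto/ApiPerfumes | OneDrive/Escritorio/automatas/separador.py | separar_en_digrafos
-- ===== SOURCE A (Python) =====
-- DIGRAFOS = ["ch", "ll", "rr"]
--
-- def separar_en_digrafos(palabra):
--     i = 0
--     salida = []
--     while i < len(palabra):
--         if i+1 < len(palabra):
--             par = palabra[i:i+2].lower()
--             if par in DIGRAFOS:
--                 salida.append(par)
--                 i += 2
--                 continue
--         salida.append(palabra[i])
--         i += 1
--     return salida
-- ===== SOURCE B (Python) =====
-- DIGRAFOS = ["ch", "ll", "rr"]
--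
-- def separar_en_digrafos(palabra):
--     # One pass over the characters with a one-char "pending" buffer,
--     # instead of index bookkeeping with slices.
--     salida = []
--     pending = None
--     for c in palabra:
--         if pending is not None and (pending + c).lower() in DIGRAFOS:
--             salida.append((pending + c).lower())
--             pending = None
--         elif pending is None:
--             pending = c
--         else:
--             salida.append(pending)
--             pending = c
--     if pending is not None:
--         salida.append(pending)
--     return salida
-- ===== Notes on version B (the rewrite author's own statement) =====
-- stated objective: simpler
-- what changed: Replaced A's while loop with explicit index arithmetic and two-character slices by a single left-to-right for loop over the characters carrying a one-character pending buffer (flushed as a lowercased digraph or a single token).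
import Mathlib
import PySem

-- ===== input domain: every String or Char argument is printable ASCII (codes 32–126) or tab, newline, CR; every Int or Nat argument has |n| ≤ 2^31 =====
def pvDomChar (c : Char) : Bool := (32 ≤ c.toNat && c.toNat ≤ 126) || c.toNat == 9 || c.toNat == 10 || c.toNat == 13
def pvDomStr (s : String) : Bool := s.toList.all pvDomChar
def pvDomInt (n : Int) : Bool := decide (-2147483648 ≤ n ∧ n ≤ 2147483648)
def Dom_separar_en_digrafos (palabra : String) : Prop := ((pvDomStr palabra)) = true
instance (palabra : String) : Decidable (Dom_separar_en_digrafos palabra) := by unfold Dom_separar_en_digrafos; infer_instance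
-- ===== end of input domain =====

-- B replaces A's index-bookkeeping while loop by a single left-to-right pass with a
-- one-character pending buffer (objective: simpler/idiomatic; same O(n) cost).

-- ===== PORT A =====
-- DIGRAFOS = ["ch", "ll", "rr"]  (as character lists; tokens are built with String.ofList)
def DIGRAFOSL : List (List Char) := ["ch".toList, "ll".toList, "rr".toList]

-- the while loop of A; `cs[i]` is Python's palabra[i] (in bounds because i < len)
def sepLoopA (cs : List Char) (i : Nat) (salida : List String) : List String :=
  if h : i < cs.length then
    if i + 1 < cs.length then
      let par := PySem.Chars.lower (PySem.List.slice cs (some (i : Int)) (some ((i : Int) + 2)))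
      if par ∈ DIGRAFOSL then
        sepLoopA cs (i + 2) (salida ++ [String.ofList par])
      else
        sepLoopA cs (i + 1) (salida ++ [String.ofList [cs[i]]])
    else
      sepLoopA cs (i + 1) (salida ++ [String.ofList [cs[i]]])
  else salida
termination_by cs.length - i
decreasing_by all_goals omega

def separar_en_digrafos (palabra : String) : List String :=
  sepLoopA palabra.toList 0 []

-- ===== PORT B =====
-- loop body of B: state = (salida, pending)
def sepStepB (st : List String × Option Char) (c : Char) : List String × Option Char :=
  match st.2 with
  | some p =>
      let par := PySem.Chars.lower [p, c]
      if par ∈ DIGRAFOSL then (st.1 ++ [String.ofList par], none)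
      else (st.1 ++ [String.ofList [p]], some c)
  | none => (st.1, some c)

def separar_en_digrafos_alt (palabra : String) : List String :=
  let st := palabra.toList.foldl sepStepB ([], none)
  match st.2 with
  | some p => st.1 ++ [String.ofList [p]]
  | none => st.1

-- ===== PRECONDITION & SPEC =====
def Spec_separar_en_digrafos (palabra : String) (out : List String) : Prop := out = separar_en_digrafos_alt palabra
instance (palabra : String) (out : List String) : Decidable (Spec_separar_en_digrafos palabra out) := by unfold Spec_separar_en_digrafos; infer_instance

-- ===== CLAIM (what is proved, stated in full; the proofs are below) =====
def Claim_equal_separar_en_digrafos : Prop := ∀ (palabra : String), Dom_separar_en_digrafos palabra → Spec_separar_en_digrafos palabra (separar_en_digrafos palabra)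

-- ===== LEMMAS AND PROOFS =====

-- reference tokenizer both ports are reduced to
def tokRec : List Char → List String
  | [] => []
  | [c] => [String.ofList [c]]
  | c1 :: c2 :: rest =>
      let par := PySem.Chars.lower [c1, c2]
      if par ∈ DIGRAFOSL then String.ofList par :: tokRec rest
      else String.ofList [c1] :: tokRec (c2 :: rest)

-- the slice palabra[i:i+2] is take 2 of the suffix
lemma slice_i_two (cs : List Char) (i : Nat) :
    PySem.List.slice cs (some (i : Int)) (some ((i : Int) + 2)) = (cs.drop i).take 2 := by
  rw [PySem.List.slice_toNat cs (by positivity) (by positivity)]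
  congr 1
  omega

lemma sepLoopA_eq_tokRec (cs : List Char) (i : Nat) (acc : List String) :
    sepLoopA cs i acc = acc ++ tokRec (cs.drop i) := by
  generalize hn : cs.length - i = n
  induction n using Nat.strong_induction_on generalizing i acc with
  | _ n ih =>
  rw [sepLoopA]
  by_cases h : i < cs.length
  · have hdrop : cs.drop i = cs[i] :: cs.drop (i + 1) := (List.getElem_cons_drop h).symm
    by_cases h2 : i + 1 < cs.length
    · have hdrop2 : cs.drop (i + 1) = cs[i+1] :: cs.drop (i + 2) :=
        (List.getElem_cons_drop h2).symm
      have htake : (cs.drop i).take 2 = [cs[i], cs[i+1]] := by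
        rw [hdrop, hdrop2]; rfl
      simp only [h, h2, dif_pos, if_pos, slice_i_two, htake]
      by_cases hd : PySem.Chars.lower [cs[i], cs[i+1]] ∈ DIGRAFOSL
      · rw [if_pos hd, ih (n - 2) (by omega) (i + 2) _ (by omega)]
        rw [hdrop, hdrop2, tokRec]
        simp [hd]
      · rw [if_neg hd, ih (n - 1) (by omega) (i + 1) _ (by omega)]
        rw [hdrop, hdrop2, tokRec]
        simp [hd]
    · have hdrop1 : cs.drop (i + 1) = [] := by
        apply List.drop_eq_nil_of_le; omega
      simp only [h, h2, dif_pos, if_false]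
      rw [ih (n - 1) (by omega) (i + 1) _ (by omega), hdrop, hdrop1, tokRec]
      simp [tokRec]
  · have : cs.drop i = [] := by apply List.drop_eq_nil_of_le; omega
    simp [h, this, tokRec]

-- flush of B's final state
def sepFinishB (st : List String × Option Char) : List String :=
  match st.2 with
  | some p => st.1 ++ [String.ofList [p]]
  | none => st.1

lemma foldl_sepStepB_pending (cs : List Char) (p : Char) (acc : List String) :
    sepFinishB (cs.foldl sepStepB (acc, some p)) = acc ++ tokRec (p :: cs) := by
  generalize hn : cs.length = n
  induction n using Nat.strong_induction_on generalizing cs p acc with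
  | _ n ih =>
  match cs with
  | [] => simp [sepFinishB, tokRec]
  | c :: rest =>
    simp only [List.foldl_cons, sepStepB]
    by_cases hd : PySem.Chars.lower [p, c] ∈ DIGRAFOSL
    · simp only [hd, if_pos]
      match rest, ih with
      | [], _ => simp [sepFinishB, tokRec, hd]
      | d :: rest', ih =>
        simp only [List.foldl_cons, sepStepB]
        rw [ih rest'.length (by simp at hn; omega) rest' d _ rfl]
        simp [tokRec, hd]
    · simp only [hd, if_false]
      rw [ih rest.length (by simp at hn; omega) rest c _ rfl]
      simp [tokRec, hd]

lemma alt_eq_tokRec (cs : List Char) :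
    sepFinishB (cs.foldl sepStepB ([], none)) = tokRec cs := by
  match cs with
  | [] => simp [sepFinishB, tokRec]
  | c :: rest =>
    simp only [List.foldl_cons, sepStepB]
    rw [foldl_sepStepB_pending rest c []]
    simp

-- ===== VERDICT (by name: the statement is the Claim_ definition above) =====
theorem separar_en_digrafos_spec : Claim_equal_separar_en_digrafos := by
  intro palabra _
  unfold Spec_separar_en_digrafos separar_en_digrafos
  have halt : separar_en_digrafos_alt palabra
      = sepFinishB (palabra.toList.foldl sepStepB ([], none)) := rfl
  rw [sepLoopA_eq_tokRec, halt, alt_eq_tokRec palabra.toList]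
  simp
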